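-- pv_equiv track=rewrite | github.com/humancalledhans/jaco-hans-tm-coverage-automation | _test_closest_match.py | _scoring_method_2
-- ===== SOURCE A (Python) =====
-- def _scoring_method_2(input_address, comparison_address):
--     '''
--     Return a score.
--     Uses a dictionary for matching individual words.
--     '''
--     occurence_map = {}
--
--     # populate the dictionary with words from input address
--     # TODO: consider spelling variations
--     for key in input_address:
--         token = str(input_address[key])
--         for word in token.split(' '):
--             if word and word not in occurence_map:
--                 occurence_map[word] = 0
--
--     # increment score for every word that appears in the comparison address
--     for key in comparison_address:
--         token = str(comparison_address[key])
--         for word in token.split(' '):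
--             if word and word in occurence_map:
--                 occurence_map[word] += 1
--
--     return sum(occurence_map.values())
-- ===== SOURCE B (Python) =====
-- def _scoring_method_2(input_address, comparison_address):
--     '''
--     Return a score.
--     No dictionary: materialise the comparison word list once, then for each
--     first occurrence of an input word count its appearances in that list with
--     an inner scan, keeping a scalar running total.
--     '''
--     comparison_words = [word
--                         for key in comparison_address
--                         for word in str(comparison_address[key]).split(' ')
--                         if word]
--     seen = []
--     total = 0
--     for key in input_address:
--         for word in str(input_address[key]).split(' '):
--             if word and word not in seen:
--                 seen.append(word)
--                 total += comparison_words.count(word)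
--     return total
-- ===== Notes on version B (the rewrite author's own statement) =====
-- stated objective: alternative
-- what changed: B drops the dictionary entirely: it materialises the comparison word list once, then for each first occurrence of an input word runs an inner list.count scan over that list, keeping only a scalar running total (nested scans + accumulator instead of A's one-pass occurrence map summed at the end).
import Mathlib
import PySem

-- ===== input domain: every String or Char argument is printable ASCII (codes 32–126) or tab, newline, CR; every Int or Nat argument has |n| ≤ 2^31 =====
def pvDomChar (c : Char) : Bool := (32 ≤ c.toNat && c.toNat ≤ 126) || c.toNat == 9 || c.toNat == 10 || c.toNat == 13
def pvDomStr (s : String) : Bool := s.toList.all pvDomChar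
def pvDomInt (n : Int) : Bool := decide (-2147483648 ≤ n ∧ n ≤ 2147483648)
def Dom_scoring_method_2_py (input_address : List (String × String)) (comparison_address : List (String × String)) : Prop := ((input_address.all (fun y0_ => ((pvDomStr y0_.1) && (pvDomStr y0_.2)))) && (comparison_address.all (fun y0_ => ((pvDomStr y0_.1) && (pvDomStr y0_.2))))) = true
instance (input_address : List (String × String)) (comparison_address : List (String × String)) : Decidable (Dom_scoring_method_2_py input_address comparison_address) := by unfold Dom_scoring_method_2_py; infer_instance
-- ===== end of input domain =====

-- B drops the dictionary: it flattens the comparison words into one list and, for each first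
-- occurrence of an input word, counts it there with an inner scan into a scalar running total
-- (alternative decomposition: nested scans + accumulator instead of a one-pass occurrence map).


-- shared primitive wrapper: str(value).split(' ') (values are strings, str() is the identity);
-- words are kept as List Char per the PySem convention of proving string facts on the list side
def pvWords (s : String) : List (List Char) := PySem.Chars.splitOn s.toList [' ']

-- ===== PORT A =====
-- dict iteration 'for key in d: token = str(d[key])' reads each key's value once; since a Python
-- dict has unique keys this is exactly one visit of each (key, value) pair in insertion order
def scoring_method_2_py (input_address : List (String × String)) (comparison_address : List (String × String)) : Int :=
  let m0 : PySem.Dict (List Char) Int :=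
    input_address.foldl (fun m kv =>
      (pvWords kv.2).foldl (fun m w =>
        if w ≠ [] ∧ m.contains w = false then m.insert w 0 else m) m)
      PySem.Dict.empty
  let m1 : PySem.Dict (List Char) Int :=
    comparison_address.foldl (fun m kv =>
      (pvWords kv.2).foldl (fun m w =>
        if w ≠ [] ∧ m.contains w = true then m.modify w 0 (· + 1) else m) m)
      m0
  m1.values.sum

-- ===== PORT B =====
def scoring_method_2_py_alt (input_address : List (String × String)) (comparison_address : List (String × String)) : Int :=
  let comparison_words : List (List Char) :=
    comparison_address.flatMap (fun kv => (pvWords kv.2).filter (fun w => w ≠ []))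
  let r : List (List Char) × Int :=
    input_address.foldl (fun st kv =>
      (pvWords kv.2).foldl (fun st w =>
        if w ≠ [] ∧ st.1.contains w = false
        then (st.1 ++ [w], st.2 + (comparison_words.count w : Int))
        else st) st) ([], 0)
  r.2

-- ===== PRECONDITION & SPEC =====
def Spec_scoring_method_2_py (input_address : List (String × String)) (comparison_address : List (String × String)) (out : Int) : Prop := out = scoring_method_2_py_alt input_address comparison_address
instance (input_address : List (String × String)) (comparison_address : List (String × String)) (out : Int) : Decidable (Spec_scoring_method_2_py input_address comparison_address out) := by unfold Spec_scoring_method_2_py; infer_instance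

-- ===== CLAIM (what is proved, stated in full; the proofs are below) =====
def Claim_equal_scoring_method_2_py : Prop := ∀ (input_address : List (String × String)) (comparison_address : List (String × String)), Dom_scoring_method_2_py input_address comparison_address → Spec_scoring_method_2_py input_address comparison_address (scoring_method_2_py input_address comparison_address)

-- ===== LEMMAS AND PROOFS =====

-- the non-empty words of all values, in order (both programs process exactly these)
def pvGood (l : List (String × String)) : List (List Char) :=
  l.flatMap (fun kv => (pvWords kv.2).filter (fun w => w ≠ []))

-- a nested per-pair word loop is the flat loop over pvGood, when the step skips empty words
theorem pvFoldl_nested {β : Type} (l : List (String × String)) (g : β → List Char → β) (b : β) :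
    l.foldl (fun m kv => (pvWords kv.2).foldl
        (fun m w => if w ≠ [] then g m w else m) m) b
      = (pvGood l).foldl g b := by
  rw [pvGood, List.foldl_flatMap]
  refine PySem.List.foldl_congr_mem _ _ _ _ (fun m kv _ => ?_)
  rw [List.foldl_filter]
  refine PySem.List.foldl_congr_mem _ _ _ _ (fun m' w _ => ?_)
  by_cases h : w = [] <;> simp [h]

-- A's first loop: keys accumulate as a Python set, values stay 0
theorem pvFromkeys_keys (l : List (List Char)) (m : PySem.Dict (List Char) Int) :
    (l.foldl (fun m w => if m.contains w = false then m.insert w 0 else m) m).keys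
      = PySem.Set.update m.keys l := by
  induction l generalizing m with
  | nil => rfl
  | cons w t ih =>
      simp only [List.foldl_cons, PySem.Set.update] at *
      by_cases h : m.contains w = false
      · rw [if_pos h, ih]
        have hw : ¬ (w ∈ m.keys) := fun hm => by
          rw [(PySem.Dict.contains_iff_mem_keys m w).2 hm] at h; cases h
        have : PySem.Set.add m.keys w = m.keys ++ [w] := by
          simp [PySem.Set.add, List.contains_eq_mem, hw]
        rw [this, PySem.Dict.keys_insert_of_not_contains m 0 h]
      · rw [if_neg h, ih]
        have hc : m.contains w = true := by simpa using h
        have hw : w ∈ m.keys := (PySem.Dict.contains_iff_mem_keys m w).1 hc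
        have : PySem.Set.add m.keys w = m.keys := by
          simp [PySem.Set.add, List.contains_eq_mem, hw]
        rw [this]

theorem pvFromkeys_getD (l : List (List Char)) (m : PySem.Dict (List Char) Int)
    (hm : ∀ k, m.getD k 0 = 0) (k : List Char) :
    (l.foldl (fun m w => if m.contains w = false then m.insert w 0 else m) m).getD k 0 = 0 := by
  induction l generalizing m with
  | nil => exact hm k
  | cons w t ih =>
      simp only [List.foldl_cons]
      by_cases h : m.contains w = false
      · rw [if_pos h]
        refine ih _ (fun k' => ?_)
        rw [PySem.Dict.getD_insert]
        split <;> simp [hm]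
      · rw [if_neg h]
        exact ih m hm

-- A's second loop: keys are unchanged, each present key gains the word count
theorem pvScore_keys (l : List (List Char)) (m : PySem.Dict (List Char) Int) :
    (l.foldl (fun m w => if m.contains w = true then m.modify w 0 (· + 1) else m) m).keys
      = m.keys := by
  induction l generalizing m with
  | nil => rfl
  | cons w t ih =>
      simp only [List.foldl_cons]
      by_cases h : m.contains w = true
      · rw [if_pos h, ih]
        rw [PySem.Dict.keys_modify, PySem.Dict.keys_insert_of_contains _ _ h]
      · rw [if_neg h]
        exact ih m

theorem pvScore_getD (l : List (List Char)) (m : PySem.Dict (List Char) Int) (k : List Char) :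
    (l.foldl (fun m w => if m.contains w = true then m.modify w 0 (· + 1) else m) m).getD k 0
      = m.getD k 0 + (if m.contains k = true then (l.count k : Int) else 0) := by
  induction l generalizing m with
  | nil => simp
  | cons w t ih =>
      simp only [List.foldl_cons]
      by_cases h : m.contains w = true
      · rw [if_pos h, ih]
        have hck : (m.modify w 0 (· + 1)).contains k = m.contains k := by
          rw [PySem.Dict.contains_modify]
          by_cases hkw : k = w <;> simp [hkw, h]
        rw [hck, PySem.Dict.getD_modify]
        by_cases hkw : k = w
        · subst hkw
          rw [if_pos rfl, if_pos h, if_pos h, List.count_cons_self]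
          push_cast
          ring
        · simp only [if_neg hkw]
          by_cases hc : m.contains k = true
          · simp [hc, Ne.symm hkw]
          · simp [hc]
      · rw [if_neg h, ih]
        by_cases hc : m.contains k = true
        · have hkw : k ≠ w := fun e => h (e ▸ hc)
          simp [hc, Ne.symm hkw]
        · simp [hc]

-- B's loop invariant: the seen list grows as a Python set update and the total tracks the
-- difference of the summed counts between the new and old seen lists
theorem pvAlt_fold (l : List (List Char)) (c : List Char → Int)
    (s : List (List Char)) (t : Int) :
    l.foldl (fun st w => if st.1.contains w = false then (st.1 ++ [w], st.2 + c w) else st)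
        ((s, t) : List (List Char) × Int)
      = (PySem.Set.update s l, t + ((PySem.Set.update s l).map c).sum - (s.map c).sum) := by
  induction l generalizing s t with
  | nil => simp [PySem.Set.update]
  | cons w tl ih =>
      simp only [List.foldl_cons]
      by_cases h : s.contains w = false
      · rw [if_pos h, ih]
        have hw : ¬ (w ∈ s) := fun hm => by
          rw [List.contains_eq_mem] at h; simp [hm] at h
        have hadd : PySem.Set.update s (w :: tl) = PySem.Set.update (s ++ [w]) tl := by
          rw [PySem.Set.update_cons, PySem.Set.add_of_not_mem hw]
        rw [hadd]
        refine Prod.ext rfl ?_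
        simp only [List.map_append, List.sum_append, List.map_cons, List.sum_cons, List.map_nil,
          List.sum_nil]
        ring
      · rw [if_neg h]
        have hc : s.contains w = true := by simpa using h
        have hw : w ∈ s := by rw [List.contains_eq_mem] at hc; simpa using hc
        have hadd : PySem.Set.update s (w :: tl) = PySem.Set.update s tl := by
          rw [PySem.Set.update_cons, PySem.Set.add_of_mem hw]
        rw [ih, hadd]

-- ===== VERDICT (by name: the statement is the Claim_ definition above) =====
theorem scoring_method_2_py_spec : Claim_equal_scoring_method_2_py := by
  intro ia ca _
  unfold Spec_scoring_method_2_py scoring_method_2_py scoring_method_2_py_alt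
  -- put all four nested loops in guard-then-act shape
  have hA1 : (fun (m : PySem.Dict (List Char) Int) (w : List Char) =>
        if w ≠ [] ∧ m.contains w = false then m.insert w 0 else m)
      = (fun m w => if w ≠ [] then (if m.contains w = false then m.insert w 0 else m) else m) := by
    funext m w
    by_cases h1 : w = [] <;> by_cases h2 : m.contains w = false <;> simp [h1, h2]
  have hA2 : (fun (m : PySem.Dict (List Char) Int) (w : List Char) =>
        if w ≠ [] ∧ m.contains w = true then m.modify w 0 (· + 1) else m)
      = (fun m w => if w ≠ [] then (if m.contains w = true then m.modify w 0 (· + 1) else m) else m) := by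
    funext m w
    by_cases h1 : w = [] <;> by_cases h2 : m.contains w = true <;> simp [h1, h2]
  have hB : (fun (st : List (List Char) × Int) (w : List Char) =>
        if w ≠ [] ∧ st.1.contains w = false
        then (st.1 ++ [w], st.2 + ((pvGood ca).count w : Int)) else st)
      = (fun st w => if w ≠ [] then
          (if st.1.contains w = false
           then (st.1 ++ [w], st.2 + ((pvGood ca).count w : Int)) else st) else st) := by
    funext st w
    by_cases h1 : w = [] <;> simp [h1]
  have hpg : List.flatMap (fun kv => List.filter (fun w => decide (w ≠ [])) (pvWords kv.2)) ca
      = pvGood ca := rfl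
  simp only [hpg]
  simp only [hA1, hA2, hB, pvFoldl_nested]
  set IW := pvGood ia with hIW
  set CW := pvGood ca with hCW
  set m0 : PySem.Dict (List Char) Int :=
    IW.foldl (fun m w => if m.contains w = false then m.insert w 0 else m)
      PySem.Dict.empty with hm0
  set m1 : PySem.Dict (List Char) Int :=
    CW.foldl (fun m w => if m.contains w = true then m.modify w 0 (· + 1) else m) m0
      with hm1
  -- B's value: the summed counts over the distinct input words
  rw [pvAlt_fold IW (fun w => ((CW.count w : Int))) [] 0]
  simp only [List.map_nil, List.sum_nil, PySem.Set.update_nil_left, zero_add, sub_zero]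
  -- A's seen words are exactly that distinct list
  have hkeys0 : m0.keys = PySem.Set.ofList IW := by
    rw [hm0, pvFromkeys_keys]; rfl
  have hkeys1 : m1.keys = PySem.Set.ofList IW := by
    rw [hm1, pvScore_keys, hkeys0]
  have hnodup : m1.keys.Nodup := by rw [hkeys1]; exact PySem.Set.nodup_ofList IW
  rw [PySem.Dict.values_eq_map_keys m1 hnodup 0, hkeys1]
  refine congrArg List.sum (List.map_congr_left (fun k hk => ?_))
  have hc0 : m0.contains k = true :=
    (PySem.Dict.contains_iff_mem_keys m0 k).2 (by rw [hkeys0]; exact hk)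
  have hz : m0.getD k 0 = 0 := by
    rw [hm0]; exact pvFromkeys_getD IW PySem.Dict.empty (fun _ => rfl) k
  rw [hm1, pvScore_getD, hz, hc0, if_pos rfl]
  simp
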